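-- pv_equiv track=rewrite | github.com/alecjackson27/OvertPrivilege | HW1/utils.py | cipher1ToCipher2
-- ===== SOURCE A (Python) =====
-- valueToKeyPolySquare = {'E':'00', '2':'01', 'R':'02', 'F':'03', 'Z':'04', 'M':'05'}
--
-- def decimalToBinary(deci):
--     converted = bin(deci).replace('0b', '')
--     while len(converted) < 6:
--         converted = '0' + converted
--     return converted
--
-- def binaryToDecimal(binary):
--     decimal, i = 0, 0
--     binary2 = int(binary)
--     while binary2 != 0:
--         dec = binary2 % 10
--         decimal = decimal + (dec * pow(2,i))
--         binary2 = binary2 // 10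
--         i += 1
--     return decimal
--
-- def cipher1ToCipher2(cipher1, padKey):
--     cipher2 = ""
--     padKey = decimalToBinary(int(padKey))
--
--     for i in range(0, len(cipher1)):
--         temp = valueToKeyPolySquare.get(cipher1[i])
--         temp = decimalToBinary(int(temp))
--         temp2 = ""
--         for j in range(len(temp)):
--             temp2 += str(int(padKey[j]) ^ int(temp[j]))
--         temp2 = str(binaryToDecimal(temp2))
--         if len(temp2) < 2:
--             temp2 = '0' + temp2
--         cipher2 += temp2
--     return cipher2
-- ===== SOURCE B (Python) =====
-- valueToKeyPolySquare = {'E':'00', '2':'01', 'R':'02', 'F':'03', 'Z':'04', 'M':'05'}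
--
-- def cipher1ToCipher2(cipher1, padKey):
--     # effective pad = leading 6 bits of int(padKey)'s binary, zero-extended to 6
--     pad = int(format(int(padKey), 'b')[:6].zfill(6), 2)
--     table = {c: format(int(v) ^ pad, '02d') for c, v in valueToKeyPolySquare.items()}
--     return ''.join(table[c] for c in cipher1)
-- ===== Notes on version B (the rewrite author's own statement) =====
-- stated objective: simpler
-- what changed: B replaces A's per-character string round-trip (dict lookup, int, 6-bit binary string, character-wise XOR on digit characters, binary-string-to-decimal loop, zero-pad) by computing the effective 6-bit pad once (leading 6 bits of int(padKey)'s binary) and building one 6-entry translation table with a single numeric XOR per entry, then joining table lookups.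
import Mathlib
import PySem

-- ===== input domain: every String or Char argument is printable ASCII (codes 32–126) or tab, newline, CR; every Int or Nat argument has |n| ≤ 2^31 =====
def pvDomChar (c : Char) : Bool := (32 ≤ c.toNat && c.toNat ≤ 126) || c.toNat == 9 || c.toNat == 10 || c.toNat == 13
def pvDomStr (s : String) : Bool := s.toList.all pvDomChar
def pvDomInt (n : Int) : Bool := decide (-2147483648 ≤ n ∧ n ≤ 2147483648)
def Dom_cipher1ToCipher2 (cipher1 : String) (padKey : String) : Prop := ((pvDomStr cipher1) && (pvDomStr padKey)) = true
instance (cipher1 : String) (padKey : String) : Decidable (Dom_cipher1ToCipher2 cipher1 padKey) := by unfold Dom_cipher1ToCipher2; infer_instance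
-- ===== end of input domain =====

-- B replaces A's per-character binary-string XOR machinery by one precomputed 6-char→2-digit
-- translation table built from a single numeric XOR with the effective 6-bit pad (objective: simpler).

-- ===== PORT A =====
-- valueToKeyPolySquare (keys are the single characters cipher1[i] is compared against)
def pvSquare : PySem.Dict Char String :=
  PySem.Dict.mk [('E', "00"), ('2', "01"), ('R', "02"), ('F', "03"), ('Z', "04"), ('M', "05")]

-- bin(n) without the '0b' prefix, for n > 0 (digit list)
-- fuel makes the halving loop structural (n halvings always finish within fuel = n)
def pvBinAux : Nat → Nat → List Char
  | 0, _ => []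
  | fuel + 1, n => if n = 0 then [] else pvBinAux fuel (n / 2) ++ [if n % 2 = 1 then '1' else '0']

-- bin(n).replace('0b','') for n ≥ 0 (Python: bin(0) = '0b0')
def pvBin (n : Nat) : List Char := if n = 0 then ['0'] else pvBinAux n n

-- the 'while len(converted) < 6: converted = "0" + converted' loop
-- the zero-padding while-loop runs at most 6 times, made structural with fuel 6
def pvPadGo : Nat → List Char → List Char
  | 0, l => l
  | fuel + 1, l => if l.length < 6 then pvPadGo fuel ('0' :: l) else l
def pvPad6 (l : List Char) : List Char := pvPadGo 6 l

-- decimalToBinary (on the nonnegative ints A feeds it under Pre_; bin of a negative keeps its sign)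
def pvDecimalToBinary (deci : Int) : List Char :=
  let converted := if deci < 0 then '-' :: pvBin (-deci).toNat else pvBin deci.toNat
  pvPad6 converted

-- binaryToDecimal's while-loop (its argument int(binary) is a nonnegative digit string here, so Nat)
def pvB2D : Nat → Nat → Nat → Nat → Nat
  | 0, _, dec, _ => dec
  | fuel + 1, b, dec, i => if b = 0 then dec else pvB2D fuel (b / 10) (dec + b % 10 * 2 ^ i) (i + 1)

def pvBinaryToDecimal (binary : List Char) : Int :=
  let b := ((PySem.Int.ofChars? binary).getD 0).toNat
  ((pvB2D b b 0 0 : Nat) : Int)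

-- one iteration of A's outer for-loop (the body appended to cipher2); .getD stands where
-- Python would raise (missing key → TypeError; those inputs are outside Pre_)
def pvStepA (padB : List Char) (c : Char) : List Char :=
  let temp := (PySem.Dict.get? pvSquare c).getD ""
  let temp := pvDecimalToBinary ((PySem.Int.ofStr? temp).getD 0)
  let temp2 := (List.range temp.length).foldl (fun t2 j =>
      t2 ++ PySem.Int.toChars
        (PySem.Int.bxor ((PySem.Int.ofChars? [padB.getD j ' ']).getD 0)
                        ((PySem.Int.ofChars? [temp.getD j ' ']).getD 0))) []
  let temp2 := PySem.Int.toChars (pvBinaryToDecimal temp2)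
  let temp2 := if temp2.length < 2 then '0' :: temp2 else temp2
  temp2

def cipher1ToCipher2 (cipher1 : String) (padKey : String) : String :=
  let padB := pvDecimalToBinary ((PySem.Int.ofStr? padKey).getD 0)
  String.mk (cipher1.toList.foldl (fun acc c => acc ++ pvStepA padB c) [])

-- ===== PORT B =====
-- format(x, '02d') for x ≥ 0 (the table values are XORs of nonnegative ints)
def pvFmt02 (x : Int) : List Char :=
  let s := PySem.Int.toChars x
  if s.length < 2 then '0' :: s else s

-- {c: format(int(v) ^ pad, '02d') for c, v in valueToKeyPolySquare.items()}
def pvTable (pad : Int) : PySem.Dict Char (List Char) :=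
  PySem.Dict.mk (pvSquare.items.map (fun cv => (cv.1, pvFmt02 (PySem.Int.bxor ((PySem.Int.ofStr? cv.2).getD 0) pad))))

def cipher1ToCipher2_alt (cipher1 : String) (padKey : String) : String :=
  let n := (PySem.Int.ofStr? padKey).getD 0                    -- int(padKey)
  let bits := (pvBin n.toNat).take 6                           -- format(n,'b')[:6], n ≥ 0 under Pre_
  let bits := List.replicate (6 - bits.length) '0' ++ bits     -- .zfill(6) (digits only, no sign here)
  let pad := (PySem.Int.ofCharsBase? bits 2).getD 0            -- int(_, 2)
  String.mk ((cipher1.toList.map (fun ch => (PySem.Dict.get? (pvTable pad) ch).getD [])).flatten)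

-- ===== PRECONDITION & SPEC =====
-- Pre_ excludes exactly the inputs where A raises: padKey not an int literal or negative
-- (ValueError, or int('-') inside the loop), and cipher1 characters outside the 6-key table
-- (TypeError from int(None)).
def Pre_cipher1ToCipher2 (cipher1 : String) (padKey : String) : Prop :=
  0 ≤ (PySem.Int.ofStr? padKey).getD (-1) ∧
  cipher1.toList.all (fun c => c ∈ (['E', '2', 'R', 'F', 'Z', 'M'] : List Char)) = true
instance (cipher1 : String) (padKey : String) : Decidable (Pre_cipher1ToCipher2 cipher1 padKey) := by
  unfold Pre_cipher1ToCipher2; infer_instance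

def pvWitness_cipher1ToCipher2 : String × String := ("E2", "5")

def Spec_cipher1ToCipher2 (cipher1 : String) (padKey : String) (out : String) : Prop := out = cipher1ToCipher2_alt cipher1 padKey
instance (cipher1 : String) (padKey : String) (out : String) : Decidable (Spec_cipher1ToCipher2 cipher1 padKey out) := by unfold Spec_cipher1ToCipher2; infer_instance

-- ===== CLAIM (what is proved, stated in full; the proofs are below) =====
def Claim_equal_cipher1ToCipher2 : Prop := ∀ (cipher1 : String) (padKey : String), Dom_cipher1ToCipher2 cipher1 padKey → Pre_cipher1ToCipher2 cipher1 padKey → Spec_cipher1ToCipher2 cipher1 padKey (cipher1ToCipher2 cipher1 padKey)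

-- ===== LEMMAS AND PROOFS =====

lemma pvPadGo_eq (fuel : Nat) : ∀ (l : List Char), 6 - l.length ≤ fuel →
    pvPadGo fuel l = List.replicate (6 - l.length) '0' ++ l := by
  induction fuel with
  | zero =>
    intro l h
    have h0 : 6 - l.length = 0 := by omega
    simp [pvPadGo, h0]
  | succ f ih =>
    intro l h
    show (if l.length < 6 then pvPadGo f ('0' :: l) else l) = _
    by_cases hl : l.length < 6
    · rw [if_pos hl, ih ('0' :: l) (by simp; omega)]
      have : 6 - l.length = (6 - ('0' :: l).length) + 1 := by simp; omega
      rw [this, List.replicate_succ']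
      simp
    · rw [if_neg hl]
      have h0 : 6 - l.length = 0 := by omega
      simp [h0]

lemma pvPad6_eq (l : List Char) : pvPad6 l = List.replicate (6 - l.length) '0' ++ l :=
  pvPadGo_eq 6 l (by omega)

lemma pvBinAux_bits (fuel : Nat) : ∀ (n : Nat), ∀ c ∈ pvBinAux fuel n, c = '0' ∨ c = '1' := by
  induction fuel with
  | zero => intro n c hc; simp [pvBinAux] at hc
  | succ f ih =>
    intro n c hc
    rw [pvBinAux] at hc
    split at hc
    · simp at hc
    · rcases List.mem_append.1 hc with h | h
      · exact ih (n / 2) c h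
      · simp at h; subst h; split <;> simp

lemma pvBin_bits (n : Nat) : ∀ c ∈ pvBin n, c = '0' ∨ c = '1' := by
  unfold pvBin
  split
  · simp
  · exact pvBinAux_bits n n

lemma take6_pad6 (l : List Char) :
    (pvPad6 l).take 6 = List.replicate (6 - (l.take 6).length) '0' ++ l.take 6 := by
  rw [pvPad6_eq]
  by_cases h : l.length ≤ 6
  · rw [List.take_of_length_le (by simp; omega), List.take_of_length_le h]
  · have h0 : 6 - l.length = 0 := by omega
    simp [h0, List.length_take]
    omega

set_option maxHeartbeats 1600000 in
-- A's inner loop reads only the first six characters of the pad string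
lemma pvStepA_take6 (b0 b1 b2 b3 b4 b5 : Char) (rest : List Char) (c : Char)
    (hc : c ∈ (['E', '2', 'R', 'F', 'Z', 'M'] : List Char)) :
    pvStepA (b0 :: b1 :: b2 :: b3 :: b4 :: b5 :: rest) c =
      pvStepA [b0, b1, b2, b3, b4, b5] c := by
  fin_cases hc <;> rfl

set_option maxHeartbeats 1000000 in
-- per-character agreement: A's bit-string XOR round-trip equals B's table entry
lemma step_eq_table (b0 b1 b2 b3 b4 b5 : Char)
    (h0 : b0 = '0' ∨ b0 = '1') (h1 : b1 = '0' ∨ b1 = '1') (h2 : b2 = '0' ∨ b2 = '1')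
    (h3 : b3 = '0' ∨ b3 = '1') (h4 : b4 = '0' ∨ b4 = '1') (h5 : b5 = '0' ∨ b5 = '1')
    (c : Char) (hc : c ∈ (['E', '2', 'R', 'F', 'Z', 'M'] : List Char)) :
    pvStepA [b0, b1, b2, b3, b4, b5] c =
      (PySem.Dict.get? (pvTable ((PySem.Int.ofCharsBase? [b0, b1, b2, b3, b4, b5] 2).getD 0)) c).getD [] := by
  fin_cases hc <;>
    rcases h0 with rfl | rfl <;> rcases h1 with rfl | rfl <;> rcases h2 with rfl | rfl <;>
    rcases h3 with rfl | rfl <;> rcases h4 with rfl | rfl <;> rcases h5 with rfl | rfl <;> decide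

lemma loop_eq (padB : List Char) (pad : Int)
    (hstep : ∀ c ∈ (['E', '2', 'R', 'F', 'Z', 'M'] : List Char),
      pvStepA padB c = (PySem.Dict.get? (pvTable pad) c).getD []) :
    ∀ (l : List Char) (acc : List Char),
      (∀ c ∈ l, c ∈ (['E', '2', 'R', 'F', 'Z', 'M'] : List Char)) →
      l.foldl (fun acc c => acc ++ pvStepA padB c) acc =
        acc ++ (l.map (fun ch => (PySem.Dict.get? (pvTable pad) ch).getD [])).flatten := by
  intro l
  induction l with
  | nil => simp
  | cons c l ih =>
    intro acc hmem
    simp only [List.foldl_cons, List.map_cons, List.flatten_cons]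
    rw [ih _ (fun x hx => hmem x (List.mem_cons_of_mem _ hx)),
        hstep c (hmem c (List.mem_cons_self)), List.append_assoc]

-- ===== VERDICT (by name: the statement is the Claim_ definition above) =====
set_option maxHeartbeats 4000000 in
theorem cipher1ToCipher2_spec : Claim_equal_cipher1ToCipher2 := by
  intro cipher1 padKey _ hpre
  obtain ⟨hpad, hmem0⟩ := hpre
  have hmem : ∀ c ∈ cipher1.toList, c ∈ (['E', '2', 'R', 'F', 'Z', 'M'] : List Char) := by
    intro c hc
    simpa using List.all_eq_true.1 hmem0 c hc
  unfold Spec_cipher1ToCipher2 cipher1ToCipher2 cipher1ToCipher2_alt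
  obtain ⟨nv, hop⟩ : ∃ v, PySem.Int.ofStr? padKey = some v := by
    cases h : PySem.Int.ofStr? padKey with
    | none => rw [h] at hpad; simp at hpad
    | some v => exact ⟨v, rfl⟩
  rw [hop] at hpad ⊢
  simp only [Option.getD_some] at hpad ⊢
  have hne : (pvBin nv.toNat).length ≠ 0 := by
    unfold pvBin; split
    · simp
    · rename_i h
      obtain ⟨m, hm⟩ : ∃ m, nv.toNat = m + 1 := ⟨nv.toNat - 1, by omega⟩
      rw [hm, pvBinAux, if_neg (by omega)]
      simp
  have hbv : ∀ c ∈ List.replicate (6 - ((pvBin nv.toNat).take 6).length) '0' ++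
      (pvBin nv.toNat).take 6, c = '0' ∨ c = '1' := by
    intro c hc
    rcases List.mem_append.1 hc with h | h
    · left; exact List.eq_of_mem_replicate h
    · exact pvBin_bits nv.toNat c (List.mem_of_mem_take h)
  have hlen : (List.replicate (6 - ((pvBin nv.toNat).take 6).length) '0' ++
      (pvBin nv.toNat).take 6).length = 6 := by
    simp only [List.length_append, List.length_replicate, List.length_take]
    omega
  have htake : (pvDecimalToBinary nv).take 6 =
      List.replicate (6 - ((pvBin nv.toNat).take 6).length) '0' ++ (pvBin nv.toNat).take 6 := by
    have hpB : pvDecimalToBinary nv = pvPad6 (pvBin nv.toNat) := by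
      unfold pvDecimalToBinary; rw [if_neg (by omega)]
    rw [hpB, take6_pad6]
  show String.mk (cipher1.toList.foldl (fun acc c => acc ++ pvStepA (pvDecimalToBinary nv) c) []) =
    String.mk ((cipher1.toList.map (fun ch => (PySem.Dict.get? (pvTable
      ((PySem.Int.ofCharsBase? (List.replicate (6 - ((pvBin nv.toNat).take 6).length) '0' ++
        (pvBin nv.toNat).take 6) 2).getD 0)) ch).getD [])).flatten)
  generalize hbq : List.replicate (6 - ((pvBin nv.toNat).take 6).length) '0' ++
      (pvBin nv.toNat).take 6 = bits at hbv hlen htake ⊢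
  generalize hpq : pvDecimalToBinary nv = pb at htake ⊢
  obtain ⟨b0, b1, b2, b3, b4, b5, hbeq⟩ :
      ∃ b0 b1 b2 b3 b4 b5, bits = [b0, b1, b2, b3, b4, b5] := by
    match bits, hlen with
    | [x0, x1, x2, x3, x4, x5], _ => exact ⟨x0, x1, x2, x3, x4, x5, rfl⟩
  have hcons : pb = b0 :: b1 :: b2 :: b3 :: b4 :: b5 :: pb.drop 6 := by
    conv_lhs => rw [← List.take_append_drop 6 pb]
    rw [htake, hbeq]; rfl
  rw [hbeq] at hbv
  have hb0 := hbv b0 (by simp)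
  have hb1 := hbv b1 (by simp)
  have hb2 := hbv b2 (by simp)
  have hb3 := hbv b3 (by simp)
  have hb4 := hbv b4 (by simp)
  have hb5 := hbv b5 (by simp)
  have hstep : ∀ c ∈ (['E', '2', 'R', 'F', 'Z', 'M'] : List Char),
      pvStepA pb c =
        (PySem.Dict.get? (pvTable ((PySem.Int.ofCharsBase? bits 2).getD 0)) c).getD [] := by
    intro c hc
    rw [hcons, pvStepA_take6 _ _ _ _ _ _ _ c hc, hbeq]
    exact step_eq_table b0 b1 b2 b3 b4 b5 hb0 hb1 hb2 hb3 hb4 hb5 c hc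
  rw [loop_eq _ _ hstep _ _ hmem]
  rfl
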